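-- pv_equiv track=rewrite | github.com/RangelGasharov/Python_Basics | algorithms/edabit_censored_strings.py | uncensor
-- ===== SOURCE A (Python) =====
-- def uncensor(text, vowels):
--     index_vowels = 0
--     new_string = ""
--     for x in text:
--         if x == "*":
--             new_string += vowels[index_vowels]
--             index_vowels += 1
--         else:
--             new_string += x
--
--     return new_string
-- ===== SOURCE B (Python) =====
-- def uncensor(text, vowels):
--     parts = text.split('*')
--     res = parts[0]
--     for i, part in enumerate(parts[1:]):
--         res += vowels[i] + part
--     return res
-- ===== Notes on version B (the rewrite author's own statement) =====
-- stated objective: faster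
-- what changed: Replaces the per-character scan-and-branch with one split on '*' followed by interleaving the segments with the vowels taken positionally.
import Mathlib
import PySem

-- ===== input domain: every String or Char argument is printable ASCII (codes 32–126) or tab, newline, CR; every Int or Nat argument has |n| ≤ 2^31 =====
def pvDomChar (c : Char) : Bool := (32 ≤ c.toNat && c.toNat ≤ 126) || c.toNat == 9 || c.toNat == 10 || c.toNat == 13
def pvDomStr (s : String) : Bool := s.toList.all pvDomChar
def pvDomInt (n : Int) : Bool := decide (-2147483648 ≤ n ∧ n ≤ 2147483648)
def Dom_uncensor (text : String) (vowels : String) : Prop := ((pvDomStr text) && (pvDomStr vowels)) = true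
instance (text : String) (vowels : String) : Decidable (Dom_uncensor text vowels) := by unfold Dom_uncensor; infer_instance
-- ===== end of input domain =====

-- B replaces A's per-character scan-and-branch by split-on-'*' then interleave with the vowels (measurably faster in Python: bulk split instead of per-character string concatenation).

-- ===== PORT A =====
-- A's loop: state (index_vowels, new_string); vowels[index_vowels] out of range = IndexError = none.
def uncensorGo (vowels : List Char) : List Char → Int → List Char → Option (List Char)
  | [], _, acc => some acc
  | x :: rest, idx, acc =>
    if x = '*' then
      match PySem.List.pyGet? vowels idx with
      | none => none
      | some v => uncensorGo vowels rest (idx + 1) (acc ++ [v])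
    else uncensorGo vowels rest idx (acc ++ [x])

def uncensor (text : String) (vowels : String) : String :=
  String.ofList ((uncensorGo vowels.toList text.toList 0 []).getD [])

-- ===== PORT B =====
-- B's loop over enumerate(parts[1:]): state (vowel index, res); vowels[i] out of range = IndexError = none.
def uncensorAltGo (vowels : List Char) : List (List Char) → Int → List Char → Option (List Char)
  | [], _, res => some res
  | p :: ps, i, res =>
    match PySem.List.pyGet? vowels i with
    | none => none
    | some v => uncensorAltGo vowels ps (i + 1) (res ++ v :: p)

def uncensor_alt (text : String) (vowels : String) : String :=
  match PySem.Chars.splitOn text.toList ['*'] with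
  | [] => ""  -- unreachable: splitOn never returns []
  | p :: ps => String.ofList ((uncensorAltGo vowels.toList ps 0 p).getD [])

-- ===== PRECONDITION & SPEC =====
-- A raises IndexError when text contains more '*' than vowels has characters; excluded.
def Pre_uncensor (text : String) (vowels : String) : Prop :=
  text.toList.count '*' ≤ vowels.toList.length
instance (text : String) (vowels : String) : Decidable (Pre_uncensor text vowels) := by
  unfold Pre_uncensor; infer_instance

def pvWitness_uncensor : String × String := ("wh*r* d*d my v*w*ls g*?", "eeioeo")

def Spec_uncensor (text : String) (vowels : String) (out : String) : Prop := out = uncensor_alt text vowels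
instance (text : String) (vowels : String) (out : String) : Decidable (Spec_uncensor text vowels out) := by unfold Spec_uncensor; infer_instance

-- ===== CLAIM (what is proved, stated in full; the proofs are below) =====
def Claim_equal_uncensor : Prop := ∀ (text : String) (vowels : String), Dom_uncensor text vowels → Pre_uncensor text vowels → Spec_uncensor text vowels (uncensor text vowels)

-- ===== LEMMAS AND PROOFS =====

-- Simple structural split of a char list on '*' (proof-side reference function).
def sstar : List Char → List (List Char)
  | [] => [[]]
  | c :: rest => if c = '*' then [] :: sstar rest else List.modifyHead (c :: ·) (sstar rest)

theorem sstar_ne_nil (l : List Char) : sstar l ≠ [] := by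
  induction l with
  | nil => simp [sstar]
  | cons c rest ih =>
    simp only [sstar]
    split
    · simp
    · cases h : sstar rest with
      | nil => exact absurd h ih
      | cons q qs => simp

theorem splitOn_go_star (l : List Char) : ∀ (fuel : Nat) (cur : List Char) (acc : List (List Char)),
    l.length < fuel →
    PySem.Chars.splitOn.go ['*'] fuel l cur acc
      = acc.reverse ++ List.modifyHead (cur.reverse ++ ·) (sstar l) := by
  induction l with
  | nil =>
    intro fuel cur acc h
    cases fuel with
    | zero => omega
    | succ f => simp [PySem.Chars.splitOn.go, sstar]
  | cons c rest ih =>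
    intro fuel cur acc h
    cases fuel with
    | zero => omega
    | succ f =>
      by_cases hc : c = '*'
      · subst hc
        rw [show PySem.Chars.splitOn.go ['*'] (f+1) ('*' :: rest) cur acc
              = PySem.Chars.splitOn.go ['*'] f rest [] (cur.reverse :: acc) by
            simp [PySem.Chars.splitOn.go, List.isPrefixOf]]
        rw [ih f [] (cur.reverse :: acc) (by simpa using h)]
        cases hs : sstar rest with
        | nil => exact absurd hs (sstar_ne_nil rest)
        | cons p ps => simp [sstar, hs]
      · have hcb : ('*' == c) = false := beq_eq_false_iff_ne.mpr (fun hh => hc hh.symm)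
        rw [show PySem.Chars.splitOn.go ['*'] (f+1) (c :: rest) cur acc
              = PySem.Chars.splitOn.go ['*'] f rest (c :: cur) acc by
            simp [PySem.Chars.splitOn.go, List.isPrefixOf, hcb]]
        rw [ih f (c :: cur) acc (by simpa using h)]
        cases hs : sstar rest with
        | nil => exact absurd hs (sstar_ne_nil rest)
        | cons p ps => simp [sstar, hs, hc]

theorem splitOn_star (l : List Char) : PySem.Chars.splitOn l ['*'] = sstar l := by
  rw [PySem.Chars.splitOn, splitOn_go_star l (l.length + 1) [] [] (by omega)]
  cases hs : sstar l <;> simp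

-- A's scan equals B's interleave over the segments of sstar.
theorem go_eq_altGo (V : List Char) (cs : List Char) : ∀ (idx : Int) (acc p : List Char) (ps : List (List Char)),
    sstar cs = p :: ps → uncensorGo V cs idx acc = uncensorAltGo V ps idx (acc ++ p) := by
  induction cs with
  | nil =>
    intro idx acc p ps h
    simp only [sstar] at h
    cases h
    simp [uncensorGo, uncensorAltGo]
  | cons c rest ih =>
    intro idx acc p ps h
    cases hs : sstar rest with
    | nil => exact absurd hs (sstar_ne_nil rest)
    | cons q qs =>
      by_cases hc : c = '*'
      · subst hc
        simp only [sstar] at h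
        cases h
        cases hv : PySem.List.pyGet? V idx with
        | none => simp [uncensorGo, uncensorAltGo, hv, hs]
        | some v =>
          have hrec := ih (idx + 1) (acc ++ [v]) q qs hs
          simp [uncensorGo, uncensorAltGo, hv, hs, hrec]
      · simp only [sstar, if_neg hc, hs, List.modifyHead] at h
        injection h with h1 h2
        subst h1; subst h2
        have hrec := ih idx (acc ++ [c]) q qs hs
        simp [uncensorGo, hc, hrec]

-- ===== VERDICT (by name: the statement is the Claim_ definition above) =====
theorem uncensor_spec : Claim_equal_uncensor := by
  intro text vowels _ _
  unfold Spec_uncensor uncensor uncensor_alt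
  rw [splitOn_star]
  cases hs : sstar text.toList with
  | nil => exact absurd hs (sstar_ne_nil _)
  | cons p ps =>
    rw [go_eq_altGo vowels.toList text.toList 0 [] p ps hs]
    simp
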